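-- pv_equiv track=rewrite | github.com/lynaee09/Cpsc335-Project2 | Project2_starter.py | invert_intervals
-- ===== SOURCE A (Python) =====
-- def invert_intervals(busy, start, end):
--     free = []
--     if not busy:
--         return [[start, end]]
--     if busy[0][0] > start:
--         free.append([start, busy[0][0]])
--     for i in range(len(busy) - 1):
--         free.append([busy[i][1], busy[i+1][0]])
--     if busy[-1][1] < end:
--         free.append([busy[-1][1], end])
--     return free
-- ===== SOURCE B (Python) =====
-- def invert_intervals(busy, start, end):
--     if not busy:
--         return [[start, end]]
--     # flat boundary list: start, s0, e0, s1, e1, ..., end; free gaps are the even-index pairs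
--     pts = [start] + [c for iv in busy for c in (iv[0], iv[1])] + [end]
--     free = [[pts[2 * i], pts[2 * i + 1]] for i in range(len(pts) // 2)]
--     lo = 0 if start < busy[0][0] else 1
--     hi = len(free) if busy[-1][1] < end else len(free) - 1
--     return free[lo:hi]
-- ===== Notes on version B (the rewrite author's own statement) =====
-- stated objective: alternative
-- what changed: Instead of A's three staged appends (head guard, index loop over consecutive intervals, tail guard), B flattens everything into one boundary list [start, s0, e0, ..., e_{n-1}, end], pairs its even-indexed elements into candidate gaps, and returns a single slice free[lo:hi] whose bounds encode the two end guards.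
import Mathlib
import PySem

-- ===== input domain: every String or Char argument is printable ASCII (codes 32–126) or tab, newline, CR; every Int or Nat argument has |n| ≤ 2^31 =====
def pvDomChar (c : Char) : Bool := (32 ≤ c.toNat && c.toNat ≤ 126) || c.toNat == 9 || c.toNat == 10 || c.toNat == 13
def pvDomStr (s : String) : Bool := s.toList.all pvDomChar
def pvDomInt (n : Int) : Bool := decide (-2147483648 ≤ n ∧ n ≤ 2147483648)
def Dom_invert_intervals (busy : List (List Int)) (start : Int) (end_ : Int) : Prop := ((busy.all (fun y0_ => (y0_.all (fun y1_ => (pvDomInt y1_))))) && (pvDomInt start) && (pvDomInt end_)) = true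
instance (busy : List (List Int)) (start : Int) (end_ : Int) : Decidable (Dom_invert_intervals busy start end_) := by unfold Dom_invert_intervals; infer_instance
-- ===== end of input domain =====

-- B replaces A's three staged appends (head guard, index loop, tail guard) by flattening all
-- boundaries into one list [start, s0, e0, …, e_{n-1}, end], pairing its even-indexed elements
-- into candidate gaps, and returning one slice free[lo:hi] whose bounds encode the end guards.

-- ===== PORT A =====
def invert_intervals (busy : List (List Int)) (start : Int) (end_ : Int) : List (List Int) :=
  if busy = [] then [[start, end_]]
  else
    let free : List (List Int) :=
      if PySem.List.pyGetD (PySem.List.pyGetD busy 0 []) 0 0 > start then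
        [[start, PySem.List.pyGetD (PySem.List.pyGetD busy 0 []) 0 0]]
      else []
    let free := (PySem.List.pyRange 0 ((busy.length : Int) - 1) 1).foldl
      (fun acc i =>
        acc ++ [[PySem.List.pyGetD (PySem.List.pyGetD busy i []) 1 0,
                 PySem.List.pyGetD (PySem.List.pyGetD busy (i + 1) []) 0 0]]) free
    if PySem.List.pyGetD (PySem.List.pyGetD busy (-1) []) 1 0 < end_ then
      free ++ [[PySem.List.pyGetD (PySem.List.pyGetD busy (-1) []) 1 0, end_]]
    else free

-- ===== PORT B =====
def invert_intervals_alt (busy : List (List Int)) (start : Int) (end_ : Int) : List (List Int) :=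
  if busy = [] then [[start, end_]]
  else
    let pts : List Int :=
      [start] ++ busy.flatMap (fun iv => [PySem.List.pyGetD iv 0 0, PySem.List.pyGetD iv 1 0])
        ++ [end_]
    let free : List (List Int) :=
      (PySem.List.pyRange 0 (PySem.Int.floordiv (pts.length : Int) 2) 1).map
        (fun i => [PySem.List.pyGetD pts (2 * i) 0, PySem.List.pyGetD pts (2 * i + 1) 0])
    let lo : Int := if start < PySem.List.pyGetD (PySem.List.pyGetD busy 0 []) 0 0 then 0 else 1
    let hi : Int :=
      if PySem.List.pyGetD (PySem.List.pyGetD busy (-1) []) 1 0 < end_ then (free.length : Int)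
      else (free.length : Int) - 1
    PySem.List.slice free (some lo) (some hi)

-- ===== PRECONDITION & SPEC =====
-- Pre_ excludes exactly the inputs where the Python A raises IndexError: a non-empty busy
-- containing an interval with fewer than 2 entries (A reads iv[0] and iv[1] of every interval).
def Pre_invert_intervals (busy : List (List Int)) (start : Int) (end_ : Int) : Prop :=
  ∀ iv ∈ busy, 2 ≤ iv.length
instance (busy : List (List Int)) (start : Int) (end_ : Int) : Decidable (Pre_invert_intervals busy start end_) := by unfold Pre_invert_intervals; infer_instance

def pvWitness_invert_intervals : List (List Int) × Int × Int := ([[1, 2], [4, 7]], 0, 10)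

def Spec_invert_intervals (busy : List (List Int)) (start : Int) (end_ : Int) (out : List (List Int)) : Prop := out = invert_intervals_alt busy start end_
instance (busy : List (List Int)) (start : Int) (end_ : Int) (out : List (List Int)) : Decidable (Spec_invert_intervals busy start end_ out) := by unfold Spec_invert_intervals; infer_instance

-- ===== CLAIM (what is proved, stated in full; the proofs are below) =====
def Claim_equal_invert_intervals : Prop := ∀ (busy : List (List Int)) (start : Int) (end_ : Int), Dom_invert_intervals busy start end_ → Pre_invert_intervals busy start end_ → Spec_invert_intervals busy start end_ (invert_intervals busy start end_)

-- ===== LEMMAS AND PROOFS =====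

-- first and second entry of an interval, as both Pythons read them
def g0 (iv : List Int) : Int := PySem.List.pyGetD iv 0 0
def g1 (iv : List Int) : Int := PySem.List.pyGetD iv 1 0

-- consecutive pairs of a flat list (what B's even-index comprehension produces)
def pairs : List Int → List (List Int)
  | a :: b :: t => [a, b] :: pairs t
  | _ => []

-- the gap chain from a running end through a list of intervals to the final end
def chain (end_ : Int) : Int → List (List Int) → List (List Int)
  | e, [] => [[e, end_]]
  | e, y :: t => [e, g0 y] :: chain end_ (g1 y) t

-- A's middle gaps, recursively
def midL : Int → List (List Int) → List (List Int)
  | _, [] => []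
  | e, y :: t => [e, g0 y] :: midL (g1 y) t

-- the end of the last interval, threaded recursively
def lastE : Int → List (List Int) → Int
  | e, [] => e
  | _, y :: t => lastE (g1 y) t

def flat (busy : List (List Int)) : List Int :=
  busy.flatMap (fun iv => [PySem.List.pyGetD iv 0 0, PySem.List.pyGetD iv 1 0])

lemma length_flat (busy : List (List Int)) : (flat busy).length = 2 * busy.length := by
  induction busy with
  | nil => rfl
  | cons x l ih => simp [flat] at ih ⊢; omega

-- B's even-index pairing comprehension is pairs
lemma pairs_eq_map (xs : List Int) :
    (List.range (xs.length / 2)).map (fun k => [xs.getD (2 * k) 0, xs.getD (2 * k + 1) 0])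
      = pairs xs := by
  induction xs using pairs.induct with
  | case1 a b t ih =>
      have hlen : (a :: b :: t).length / 2 = t.length / 2 + 1 := by simp; omega
      rw [hlen, List.range_succ_eq_map, List.map_cons, List.map_map]
      have h0 : [(a :: b :: t).getD (2 * 0) 0, (a :: b :: t).getD (2 * 0 + 1) 0] = [a, b] := by
        simp
      have hf : ((fun k => [(a :: b :: t).getD (2 * k) 0, (a :: b :: t).getD (2 * k + 1) 0])
            ∘ Nat.succ) = fun k => [t.getD (2 * k) 0, t.getD (2 * k + 1) 0] := by
        funext k
        have h2 : 2 * Nat.succ k = 2 * k + 1 + 1 := by omega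
        simp [Function.comp, h2]
      rw [h0, hf, ih, pairs]
  | case2 xs h =>
      match xs, h with
      | [], _ => rfl
      | [a], _ => simp [pairs]
      | a :: b :: t, h => exact (h a b t rfl).elim

-- pairing the flat boundary list gives the gap chain
lemma pairs_flat (end_ : Int) : ∀ (l : List (List Int)) (e : Int),
    pairs (e :: (flat l ++ [end_])) = chain end_ e l := by
  intro l
  induction l with
  | nil => intro e; rfl
  | cons y t ih =>
      intro e
      simp only [flat, List.flatMap_cons] at ih ⊢
      rw [List.append_assoc, List.cons_append, List.cons_append, pairs,
        List.nil_append, ih, chain, g0, g1]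

lemma chain_decomp (end_ : Int) : ∀ (l : List (List Int)) (e : Int),
    chain end_ e l = midL e l ++ [[lastE e l, end_]] := by
  intro l
  induction l with
  | nil => intro e; rfl
  | cons y t ih => intro e; rw [chain, midL, lastE, ih, List.cons_append]

lemma length_midL : ∀ (l : List (List Int)) (e : Int), (midL e l).length = l.length := by
  intro l
  induction l with
  | nil => intro e; rfl
  | cons y t ih => intro e; rw [midL]; simp [ih]

-- the pair A's middle loop emits at index k, written over Nat indices
def pairsA (busy : List (List Int)) (k : Nat) : List Int :=
  [PySem.List.pyGetD (busy.getD k []) 1 0, PySem.List.pyGetD (busy.getD (k + 1) []) 0 0]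

-- A's indexed middle loop emits exactly the recursive middle-gap list
lemma midA : ∀ (l : List (List Int)) (x : List Int),
    (List.range l.length).map (pairsA (x :: l)) = midL (g1 x) l := by
  intro l
  induction l with
  | nil => intro x; rfl
  | cons y t ih =>
      intro x
      have hhead : pairsA (x :: y :: t) 0 = [g1 x, g0 y] := by simp [pairsA, g0, g1]
      have htail : pairsA (x :: y :: t) ∘ Nat.succ = pairsA (y :: t) :=
        funext (fun k => by simp [pairsA, Function.comp])
      rw [List.length_cons, List.range_succ_eq_map, List.map_cons, List.map_map, hhead, htail,
        ih y, midL]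

lemma lastE_eq : ∀ (l : List (List Int)) (x : List Int),
    g1 ((x :: l).getLast (by simp)) = lastE (g1 x) l := by
  intro l
  induction l with
  | nil => intro x; rfl
  | cons y t ih => intro x; rw [lastE, ← ih y]; simp

-- ===== VERDICT (by name: the statement is the Claim_ definition above) =====
theorem invert_intervals_spec : Claim_equal_invert_intervals := by
  intro busy start end_ _ _
  unfold Spec_invert_intervals invert_intervals invert_intervals_alt
  cases busy with
  | nil => rfl
  | cons x l =>
      simp only [if_neg (by simp : ¬ (x :: l = []))]
      -- normalize A's side to headA ++ midL ++ tailA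
      have hrange : PySem.List.pyRange 0 (((x :: l).length : Int) - 1) 1
          = (List.range l.length).map (fun k : Nat => (k : Int)) := by
        rw [List.length_cons]
        have h1 : (((l.length + 1 : Nat) : Int) - 1) = (l.length : Int) := by push_cast; ring
        rw [h1, PySem.List.pyRange_zero_natCast]
      rw [hrange]
      rw [PySem.List.foldl_append_singleton_eq_map
        (f := fun i => [PySem.List.pyGetD (PySem.List.pyGetD (x :: l) i []) 1 0,
                        PySem.List.pyGetD (PySem.List.pyGetD (x :: l) (i + 1) []) 0 0])]
      rw [List.map_map]
      have hfun : (List.range l.length).map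
            ((fun i : Int => [PySem.List.pyGetD (PySem.List.pyGetD (x :: l) i []) 1 0,
                PySem.List.pyGetD (PySem.List.pyGetD (x :: l) (i + 1) []) 0 0])
              ∘ (fun k : Nat => (k : Int)))
          = (List.range l.length).map (pairsA (x :: l)) := by
        refine List.map_congr_left (fun k _ => ?_)
        have h2 : ((k : Int) + 1) = ((k + 1 : Nat) : Int) := by push_cast; ring
        simp only [Function.comp, h2, PySem.List.pyGetD_natCast, pairsA]
      rw [hfun, midA]
      have hlast : PySem.List.pyGetD (PySem.List.pyGetD (x :: l) (-1) []) 1 0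
          = lastE (g1 x) l := by
        rw [PySem.List.pyGetD_neg_one (x :: l) ([] : List Int) (by simp), ← g1, lastE_eq]
      rw [hlast]
      -- normalize B's side: free = [start, g0 x] :: chain end_ (g1 x) l
      have hpts : [start] ++ flat (x :: l) ++ [end_]
          = start :: (flat (x :: l) ++ [end_]) := by simp
      have hptslen : ((start :: (flat (x :: l) ++ [end_])).length : Int)
          = ((2 * (l.length + 2) : Nat) : Int) := by
        simp [length_flat]; ring
      have hdiv : PySem.Int.floordiv ((2 * (l.length + 2) : Nat) : Int) 2
          = ((l.length + 2 : Nat) : Int) := by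
        rw [show ((2 : Int)) = ((2 : Nat) : Int) from rfl, PySem.Int.floordiv_natCast]
        norm_num
      have hfree : (PySem.List.pyRange 0
            (PySem.Int.floordiv (((([start] ++ flat (x :: l) ++ [end_]) : List Int).length : Int)) 2) 1).map
            (fun i => [PySem.List.pyGetD ([start] ++ flat (x :: l) ++ [end_]) (2 * i) 0,
                       PySem.List.pyGetD ([start] ++ flat (x :: l) ++ [end_]) (2 * i + 1) 0])
          = [start, g0 x] :: chain end_ (g1 x) l := by
        rw [hpts, hptslen, hdiv, PySem.List.pyRange_zero_natCast, List.map_map]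
        have hfun2 : ((fun i : Int =>
              [PySem.List.pyGetD (start :: (flat (x :: l) ++ [end_])) (2 * i) 0,
               PySem.List.pyGetD (start :: (flat (x :: l) ++ [end_])) (2 * i + 1) 0])
            ∘ (fun k : Nat => (k : Int)))
            = fun k : Nat => [(start :: (flat (x :: l) ++ [end_])).getD (2 * k) 0,
                              (start :: (flat (x :: l) ++ [end_])).getD (2 * k + 1) 0] := by
          funext k
          have ha : (2 : Int) * (k : Int) = ((2 * k : Nat) : Int) := by push_cast; ring
          have hb : (2 : Int) * (k : Int) + 1 = ((2 * k + 1 : Nat) : Int) := by push_cast; ring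
          simp only [Function.comp]
          rw [hb, ha]
          simp only [PySem.List.pyGetD_natCast]
        rw [hfun2]
        have hhalf : l.length + 2 = (start :: (flat (x :: l) ++ [end_])).length / 2 := by
          simp [length_flat]; omega
        rw [hhalf, pairs_eq_map]
        have : flat (x :: l) = g0 x :: g1 x :: flat l := by
          simp [flat, g0, g1]
        rw [this, List.cons_append, List.cons_append, pairs, pairs_flat]
      have hflat : List.flatMap (fun iv => [PySem.List.pyGetD iv 0 0, PySem.List.pyGetD iv 1 0])
          (x :: l) = flat (x :: l) := rfl
      rw [hflat, hfree]
      -- both guards read the same values; split and compute the slice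
      have hg0 : PySem.List.pyGetD (PySem.List.pyGetD (x :: l) 0 []) 0 0 = g0 x := by
        simp [g0]
      rw [hg0]
      set F : List (List Int) := [start, g0 x] :: chain end_ (g1 x) l with hF
      have hFlen : F.length = l.length + 2 := by
        rw [hF, chain_decomp]; simp [length_midL]
      have hFdec : F = ([[start, g0 x]] ++ midL (g1 x) l) ++ [[lastE (g1 x) l, end_]] := by
        rw [hF, chain_decomp]; simp
      have hGlen : ([[start, g0 x]] ++ midL (g1 x) l).length = l.length + 1 := by
        simp [length_midL]
      by_cases h1 : start < g0 x <;> by_cases h2 : lastE (g1 x) l < end_ <;>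
        simp only [h1, h2, ite_true, ite_false]
      · -- both guards hold: full slice
        rw [show ((F.length : Int)) = ((F.length : Nat) : Int) from rfl,
          PySem.List.slice_zero_start, PySem.List.slice_to_natCast, List.take_length, hFdec]
      · -- head holds, tail fails: drop the last pair
        rw [show ((F.length : Int) - 1) = ((l.length + 1 : Nat) : Int) by
            rw [hFlen]; push_cast; ring,
          PySem.List.slice_zero_start, PySem.List.slice_to_natCast,
          show F = ([[start, g0 x]] ++ midL (g1 x) l) ++ [[lastE (g1 x) l, end_]] by
            rw [hFdec, List.append_assoc],
          ← hGlen]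
        exact List.take_left.symm
      · -- head fails, tail holds: drop the first pair
        rw [show ((1 : Int)) = (((1 : Nat)) : Int) from rfl,
          show ((F.length : Int)) = ((F.length : Nat) : Int) from rfl,
          PySem.List.slice_natCast, hF]
        simp only [List.drop_succ_cons, List.drop_zero]
        rw [List.take_of_length_le (by rw [chain_decomp]; simp [length_midL]),
          chain_decomp]
        simp
      · -- both fail: keep only the middle pairs
        rw [show ((F.length : Int) - 1) = ((l.length + 1 : Nat) : Int) by
            rw [hFlen]; push_cast; ring,
          show ((1 : Int)) = (((1 : Nat)) : Int) from rfl,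
          PySem.List.slice_natCast, hF]
        simp only [List.drop_succ_cons, List.drop_zero]
        rw [chain_decomp, show l.length + 1 - 1 = (midL (g1 x) l).length by rw [length_midL]; omega,
          List.take_left]
        simp
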